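-- pv_equiv track=rewrite | github.com/dpsnet/Fixed-4D-Topology | extended_research/I_network_geometry/data/download_and_validate.py | _ball
-- ===== SOURCE A (Python) =====
-- from typing import Dict, Set, Optional, Tuple, List
--
-- def _ball(graph: Dict[int, Set[int]], center: int,
--           radius: int) -> Set[int]:
--     """Get ball of given radius around center node (BFS)."""
--     ball = {center}
--     frontier = {center}
--
--     for _ in range(radius):
--         new_frontier = set()
--         for node in frontier:
--             new_frontier.update(graph.get(node, set()))
--         new_frontier -= ball
--         ball.update(new_frontier)
--         frontier = new_frontier
--         if not frontier:
--             break
--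
--     return ball
-- ===== SOURCE B (Python) =====
-- def _ball(graph, center, radius):
--     """Ball via fixed-point iteration of S -> S | neighbors(S): no frontier,
--     the whole current ball is re-expanded each round until it stops growing."""
--     ball = {center}
--     for _ in range(radius):
--         expanded = set(ball)
--         for node in ball:
--             expanded.update(graph.get(node, set()))
--         if len(expanded) == len(ball):
--             break
--         ball = expanded
--     return ball
-- ===== Notes on version B (the rewrite author's own statement) =====
-- stated objective: simpler
-- what changed: Replaces the frontier-based BFS (separate frontier set, new_frontier accumulation, set subtraction against the ball) by naive fixed-point iteration of the one-step neighborhood operator: each round re-expands the WHOLE current ball and stops when it no longer grows, so no frontier or set difference is maintained at all.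
import Mathlib
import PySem

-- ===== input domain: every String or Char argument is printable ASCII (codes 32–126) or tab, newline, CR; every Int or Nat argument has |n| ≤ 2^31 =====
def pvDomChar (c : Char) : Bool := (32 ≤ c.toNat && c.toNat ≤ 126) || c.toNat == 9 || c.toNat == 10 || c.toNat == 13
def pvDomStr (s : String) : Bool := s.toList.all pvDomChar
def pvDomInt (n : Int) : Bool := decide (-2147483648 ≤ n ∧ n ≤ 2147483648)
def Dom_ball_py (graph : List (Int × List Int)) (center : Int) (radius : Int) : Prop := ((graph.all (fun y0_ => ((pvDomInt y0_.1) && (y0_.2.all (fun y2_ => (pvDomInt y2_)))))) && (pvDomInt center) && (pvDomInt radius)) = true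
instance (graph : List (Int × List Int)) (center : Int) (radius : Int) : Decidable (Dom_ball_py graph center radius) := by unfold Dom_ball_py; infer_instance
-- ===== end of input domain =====

-- B replaces A's frontier-based BFS by naive fixed-point iteration of S -> S ∪ Γ(S):
-- each round re-expands the whole current ball (no frontier, no set difference) until it
-- stops growing. Alternative decomposition; not faster.


-- ===== PORT A =====
-- one iteration body + the 'for _ in range(radius)' loop with its early break, as in A
def aLoop (graph : List (Int × List Int)) : Nat → PySem.Set Int → PySem.Set Int → PySem.Set Int
  | 0, ball, _ => ball
  | n+1, ball, frontier =>
      -- new_frontier = set(); for node in frontier: new_frontier.update(graph.get(node, set()))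
      let nf : PySem.Set Int :=
        frontier.foldl (fun acc node => PySem.Set.update acc (PySem.Dict.getD (PySem.Dict.mk graph) node [])) PySem.Set.empty
      -- new_frontier -= ball
      let nf2 : PySem.Set Int := PySem.Set.diff nf ball
      -- ball.update(new_frontier); frontier = new_frontier; if not frontier: break
      let ball2 : PySem.Set Int := PySem.Set.update ball nf2
      if nf2.isEmpty then ball2 else aLoop graph n ball2 nf2

def ball_py (graph : List (Int × List Int)) (center : Int) (radius : Int) : List Int :=
  aLoop graph radius.toNat (PySem.Set.ofList [center]) (PySem.Set.ofList [center])

-- ===== PORT B =====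
-- 'expanded = set(ball); for node in ball: expanded.update(graph.get(node, set()))'
def bExpand (graph : List (Int × List Int)) (ball : PySem.Set Int) : PySem.Set Int :=
  ball.foldl (fun acc node => PySem.Set.update acc (PySem.Dict.getD (PySem.Dict.mk graph) node []))
    (PySem.Set.ofList ball)

-- the 'for _ in range(radius)' loop with its early 'len(expanded) == len(ball)' break
def bIter (graph : List (Int × List Int)) : Nat → PySem.Set Int → PySem.Set Int
  | 0, ball => ball
  | n+1, ball =>
      let expanded := bExpand graph ball
      if expanded.length = ball.length then ball else bIter graph n expanded

def ball_py_alt (graph : List (Int × List Int)) (center : Int) (radius : Int) : List Int :=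
  bIter graph radius.toNat (PySem.Set.ofList [center])

-- ===== PRECONDITION & SPEC =====
def Spec_ball_py (graph : List (Int × List Int)) (center : Int) (radius : Int) (out : List Int) : Prop := out = ball_py_alt graph center radius
instance (graph : List (Int × List Int)) (center : Int) (radius : Int) (out : List Int) : Decidable (Spec_ball_py graph center radius out) := by unfold Spec_ball_py; infer_instance

-- ===== CLAIM =====
def Claim_equal_ball_py : Prop := ∀ (graph : List (Int × List Int)) (center : Int) (radius : Int), Dom_ball_py graph center radius → Spec_ball_py graph center radius (ball_py graph center radius)

-- ===== LEMMAS AND PROOFS =====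

-- first occurrences in nbs that are fresh w.r.t. the growing seen list s
def newF (s : List Int) : List Int → List Int
  | [] => []
  | nb :: nbs => if s.contains nb then newF s nbs else nb :: newF (s ++ [nb]) nbs

-- Set.update appends exactly the fresh first occurrences
theorem update_eq_newF (nbs : List Int) : ∀ s : List Int,
    PySem.Set.update s nbs = s ++ newF s nbs := by
  induction nbs with
  | nil => intro s; simp [PySem.Set.update, newF]
  | cons nb nbs ih =>
      intro s
      by_cases h : s.contains nb = true
      · have hm : nb ∈ s := by simpa using h
        have hadd : PySem.Set.add s nb = s := by
          simp [PySem.Set.add, PySem.Set.contains, hm]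
        rw [PySem.Set.update_cons, hadd, ih s]
        simp only [newF]
        rw [if_pos h]
      · have hm : nb ∉ s := by simpa using h
        have hadd : PySem.Set.add s nb = s ++ [nb] := by
          simp [PySem.Set.add, PySem.Set.contains, hm]
        rw [PySem.Set.update_cons, hadd, ih (s ++ [nb])]
        simp only [newF]
        rw [if_neg h]
        simp [List.append_assoc]

-- no fresh elements when everything is already present
theorem newF_nil_of_subset (nbs : List Int) : ∀ s : List Int,
    (∀ x ∈ nbs, x ∈ s) → newF s nbs = [] := by
  induction nbs with
  | nil => intro s _; rfl
  | cons nb nbs ih =>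
      intro s h
      have hc : s.contains nb = true := by
        simpa using h nb (by simp)
      simp only [newF, hc, if_pos]
      exact ih s (fun x hx => h x (by simp [hx]))

theorem newF_diff (ball : List Int) (nbs : List Int) :
    ∀ accNF : List Int,
      PySem.Set.diff accNF ball ++ newF (ball ++ PySem.Set.diff accNF ball) nbs
        = PySem.Set.diff (PySem.Set.update accNF nbs) ball := by
  induction nbs with
  | nil => simp [newF, PySem.Set.update]
  | cons nb nbs ih =>
      intro accNF
      have hupd : PySem.Set.update accNF (nb :: nbs) = PySem.Set.update (PySem.Set.add accNF nb) nbs := rfl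
      rw [hupd]
      by_cases hb : nb ∈ ball <;> by_cases ha : nb ∈ accNF
      · have hmem : (ball ++ PySem.Set.diff accNF ball).contains nb = true := by
          simp [hb]
        have hadd : PySem.Set.add accNF nb = accNF := by
          simp [PySem.Set.add, PySem.Set.contains, ha]
        simp only [newF, hmem, if_pos, hadd]
        exact ih accNF
      · have hmem : (ball ++ PySem.Set.diff accNF ball).contains nb = true := by
          simp [hb]
        have hadd : PySem.Set.add accNF nb = accNF ++ [nb] := by
          simp [PySem.Set.add, PySem.Set.contains, ha]
        have hdiff : PySem.Set.diff (accNF ++ [nb]) ball = PySem.Set.diff accNF ball := by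
          simp [PySem.Set.diff, List.filter_append, hb]
        simp only [newF, hmem, if_pos, hadd]
        have := ih (accNF ++ [nb])
        rw [hdiff] at this
        exact this
      · have hmem : (ball ++ PySem.Set.diff accNF ball).contains nb = true := by
          simp [PySem.Set.diff, ha]
        have hadd : PySem.Set.add accNF nb = accNF := by
          simp [PySem.Set.add, PySem.Set.contains, ha]
        simp only [newF, hmem, if_pos, hadd]
        exact ih accNF
      · have hmem : (ball ++ PySem.Set.diff accNF ball).contains nb = false := by
          simp [PySem.Set.diff, hb, ha]
        have hadd : PySem.Set.add accNF nb = accNF ++ [nb] := by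
          simp [PySem.Set.add, PySem.Set.contains, ha]
        have hdiff : PySem.Set.diff (accNF ++ [nb]) ball
            = PySem.Set.diff accNF ball ++ [nb] := by
          simp [PySem.Set.diff, List.filter_append, hb]
        simp only [newF, hmem, Bool.false_eq_true, if_neg, not_false_iff, hadd]
        have := ih (accNF ++ [nb])
        rw [hdiff] at this
        simpa [List.append_assoc] using this

-- folding the update over nodes whose neighbours are all already in s leaves s unchanged
theorem closed_fold (graph : List (Int × List Int)) (b0 : List Int) :
    ∀ s : List Int,
      (∀ node ∈ b0, ∀ x ∈ PySem.Dict.getD (PySem.Dict.mk graph) node [], x ∈ s) →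
      b0.foldl (fun acc node => PySem.Set.update acc (PySem.Dict.getD (PySem.Dict.mk graph) node [])) s = s := by
  induction b0 with
  | nil => intro s _; rfl
  | cons node b0 ih =>
      intro s h
      have hstep : PySem.Set.update s (PySem.Dict.getD (PySem.Dict.mk graph) node []) = s := by
        rw [update_eq_newF, newF_nil_of_subset _ s (h node (by simp))]
        simp
      simp only [List.foldl_cons, hstep]
      exact ih s (fun n hn => h n (by simp [hn]))

-- folding the update over the frontier, started at the ball, tracks A's accumulator
theorem frontier_fold (graph : List (Int × List Int)) (ball : List Int) :
    ∀ (fr accNF : List Int),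
      fr.foldl (fun acc node => PySem.Set.update acc (PySem.Dict.getD (PySem.Dict.mk graph) node []))
          (ball ++ PySem.Set.diff accNF ball)
        = ball ++ PySem.Set.diff
            (fr.foldl (fun acc node => PySem.Set.update acc (PySem.Dict.getD (PySem.Dict.mk graph) node [])) accNF) ball := by
  intro fr
  induction fr with
  | nil => intro accNF; rfl
  | cons node fr ih =>
      intro accNF
      simp only [List.foldl_cons]
      rw [update_eq_newF, List.append_assoc, newF_diff ball _ accNF]
      exact ih (PySem.Set.update accNF (PySem.Dict.getD (PySem.Dict.mk graph) node []))

-- the A-side new-frontier fold is set(flatMap of the adjacency lists)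
theorem nf_eq_ofList (graph : List (Int × List Int)) (fr : List Int) :
    fr.foldl (fun a node => PySem.Set.update a (PySem.Dict.getD (PySem.Dict.mk graph) node [])) PySem.Set.empty
      = PySem.Set.ofList (fr.flatMap (fun node => PySem.Dict.getD (PySem.Dict.mk graph) node [])) := by
  rw [PySem.Set.ofList_eq_foldl]
  simp only [PySem.Set.update, List.foldl_flatMap]
  rfl

-- the main correspondence: B's whole-ball re-expansion equals A's frontier step,
-- whenever the ball splits as closed part ++ frontier
theorem main_corr (graph : List (Int × List Int)) :
    ∀ (k : Nat) (b0 fr : List Int),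
      (b0 ++ fr).Nodup →
      (∀ node ∈ b0, ∀ x ∈ PySem.Dict.getD (PySem.Dict.mk graph) node [], x ∈ b0 ++ fr) →
      bIter graph k (b0 ++ fr) = aLoop graph k (b0 ++ fr) fr := by
  intro k
  induction k with
  | zero => intro b0 fr _ _; rfl
  | succ k ih =>
      intro b0 fr hnd hclosed
      set ball : List Int := b0 ++ fr with hball
      set NF : List Int :=
        fr.foldl (fun acc node => PySem.Set.update acc (PySem.Dict.getD (PySem.Dict.mk graph) node [])) PySem.Set.empty with hNF
      set nf2 : List Int := PySem.Set.diff NF ball with hnf2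
      -- B's expansion computes ball ++ nf2
      have hexp : bExpand graph ball = ball ++ nf2 := by
        unfold bExpand
        rw [PySem.Set.ofList_eq_self_of_nodup ball hnd]
        rw [hball, List.foldl_append, ← hball]
        rw [closed_fold graph b0 ball hclosed]
        have h0 : ball = ball ++ PySem.Set.diff (PySem.Set.empty : PySem.Set Int) ball := by
          simp [PySem.Set.diff, PySem.Set.empty]
        calc fr.foldl (fun acc node => PySem.Set.update acc (PySem.Dict.getD (PySem.Dict.mk graph) node [])) ball
            = fr.foldl (fun acc node => PySem.Set.update acc (PySem.Dict.getD (PySem.Dict.mk graph) node []))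
                (ball ++ PySem.Set.diff (PySem.Set.empty : PySem.Set Int) ball) := by rw [← h0]
          _ = ball ++ nf2 := by rw [frontier_fold]
      -- facts about nf2
      have hNFnd : NF.Nodup := by
        rw [hNF, nf_eq_ofList]; exact PySem.Set.nodup_ofList _
      have hnf2nd : nf2.Nodup := by
        rw [hnf2]; exact PySem.Set.nodup_diff NF ball hNFnd
      have hfresh : ∀ x ∈ nf2, x ∉ ball := by
        intro x hx
        exact ((PySem.Set.mem_diff NF ball x).mp (by simpa [hnf2] using hx)).2
      have hupd : PySem.Set.update ball nf2 = ball ++ nf2 :=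
        PySem.Set.update_eq_append_of_disjoint ball nf2 hnf2nd hfresh
      -- A's step, literally
      have hA : aLoop graph (k+1) ball fr
          = if nf2.isEmpty then PySem.Set.update ball nf2 else aLoop graph k (PySem.Set.update ball nf2) nf2 := rfl
      have hB : bIter graph (k+1) ball
          = if (bExpand graph ball).length = ball.length then ball else bIter graph k (bExpand graph ball) := rfl
      rw [hA, hB, hexp, hupd]
      by_cases hemp : nf2.isEmpty
      · have hnil : nf2 = [] := List.isEmpty_iff.mp hemp
        rw [if_pos hemp, hnil, List.append_nil, if_pos rfl]
      · have hnil : nf2 ≠ [] := fun h => hemp (by simp [h])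
        have hlen : ¬ (ball ++ nf2).length = ball.length := by
          simp only [List.length_append]
          have : 0 < nf2.length := List.length_pos_iff.mpr hnil
          omega
        rw [if_neg hemp, if_neg hlen]
        -- recurse with the closed part = the whole old ball, frontier = nf2
        apply ih ball nf2
        · exact List.Nodup.append hnd hnf2nd (fun x hx hx2 => hfresh x hx2 hx)
        · intro node hnode x hx
          rcases List.mem_append.mp (hball ▸ hnode) with h | h
          · exact List.mem_append_left _ (hclosed node h x hx)
          · -- node ∈ fr, so x ∈ NF; then x is in ball or in nf2
            have hxNF : x ∈ NF := by
              rw [hNF, nf_eq_ofList, PySem.Set.mem_ofList]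
              exact List.mem_flatMap.mpr ⟨node, h, hx⟩
            by_cases hxb : x ∈ ball
            · exact List.mem_append_left _ hxb
            · exact List.mem_append_right _ (by rw [hnf2]; exact (PySem.Set.mem_diff NF ball x).mpr ⟨hxNF, hxb⟩)

-- ===== VERDICT (by name: the statement is the Claim_ definition above) =====
theorem ball_py_spec : Claim_equal_ball_py := by
  intro graph center radius _
  unfold Spec_ball_py ball_py ball_py_alt
  have hof : PySem.Set.ofList [center] = [center] :=
    PySem.Set.ofList_eq_self_of_nodup [center] (by simp)
  rw [hof]
  have h := main_corr graph radius.toNat [] [center] (by simp) (by simp)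
  simpa using h.symm
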